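-- pv_equiv track=rewrite | github.com/KipianiNikoloz/BlazeORM | src/blazeorm/adapters/postgres.py | _count_placeholders
-- ===== SOURCE A (Python) =====
-- def _count_placeholders(sql: str) -> int:
--     count = 0
--     idx = 0
--     while idx < len(sql) - 1:
--         if sql[idx] == "%" and sql[idx + 1] == "s":
--             count += 1
--             idx += 2
--             continue
--         if sql[idx] == "%" and sql[idx + 1] == "%":
--             idx += 2
--             continue
--         idx += 1
--     return count
-- ===== SOURCE B (Python) =====
-- def _count_placeholders(sql: str) -> int:
--     return sql.replace("%%", "").count("%s")
-- ===== Notes on version B (the rewrite author's own statement) =====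
-- stated objective: simpler
-- what changed: Replaces A's indexed while-loop with two explicit branches and a manual cursor by a two-step string computation: strip every %% escape with str.replace, then substring-count the remaining placeholders with str.count.
import Mathlib
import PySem

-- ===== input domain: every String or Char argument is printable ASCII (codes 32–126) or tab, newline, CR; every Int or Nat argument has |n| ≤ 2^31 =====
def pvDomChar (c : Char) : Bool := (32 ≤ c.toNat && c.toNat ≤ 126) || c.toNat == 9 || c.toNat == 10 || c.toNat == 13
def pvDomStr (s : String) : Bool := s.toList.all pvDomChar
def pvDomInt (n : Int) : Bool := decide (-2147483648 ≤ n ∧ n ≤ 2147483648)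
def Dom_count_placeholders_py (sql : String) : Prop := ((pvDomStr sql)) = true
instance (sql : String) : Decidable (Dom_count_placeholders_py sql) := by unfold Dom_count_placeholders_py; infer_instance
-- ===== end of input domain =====

-- B replaces A's indexed two-branch scan by replace("%%","") followed by count("%s"); objective: simpler (same O(n) cost).

-- ===== PORT A =====
-- Transliteration of A's while loop: the remaining list tail plays the index `idx`;
-- `idx < len(sql) - 1` is "at least two characters remain", `sql[idx]`/`sql[idx+1]`
-- are the first two elements, and `count` is the accumulator.
def countAgo : List Char → Int → Int
  | [], count => count
  | [_], count => count
  | c1 :: c2 :: rest, count =>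
      if c1 = '%' ∧ c2 = 's' then countAgo rest (count + 1)
      else if c1 = '%' ∧ c2 = '%' then countAgo rest count
      else countAgo (c2 :: rest) count
  termination_by l _ => l.length

def count_placeholders_py (sql : String) : Int := countAgo sql.toList 0

-- ===== PORT B =====
def count_placeholders_py_alt (sql : String) : Int :=
  ((PySem.Str.count (PySem.Str.replace sql "%%" "") "%s" : Nat) : Int)

-- ===== PRECONDITION & SPEC =====
def Spec_count_placeholders_py (sql : String) (out : Int) : Prop := out = count_placeholders_py_alt sql
instance (sql : String) (out : Int) : Decidable (Spec_count_placeholders_py sql out) := by unfold Spec_count_placeholders_py; infer_instance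

-- ===== CLAIM (what is proved, stated in full; the proofs are below) =====
def Claim_equal_count_placeholders_py : Prop := ∀ (sql : String), Dom_count_placeholders_py sql → Spec_count_placeholders_py sql (count_placeholders_py sql)

-- ===== LEMMAS AND PROOFS =====

-- what replace("%%","") builds: l with every "%%" pair removed, leftmost-first
def pvRep : List Char → List Char
  | [] => []
  | [c] => [c]
  | c1 :: c2 :: t => if c1 = '%' ∧ c2 = '%' then pvRep t else c1 :: pvRep (c2 :: t)
  termination_by l => l.length

-- what count("%s") computes: number of non-overlapping "%s", leftmost-first
def pvCnt : List Char → Nat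
  | [] => 0
  | [_] => 0
  | c1 :: c2 :: t => if c1 = '%' ∧ c2 = 's' then pvCnt t + 1 else pvCnt (c2 :: t)
  termination_by l => l.length

lemma pvRep_cons_ne (c : Char) (t : List Char) (h : c ≠ '%') : pvRep (c :: t) = c :: pvRep t := by
  cases t with
  | nil => simp [pvRep]
  | cons d t2 => simp [pvRep, h]

lemma pvCnt_cons_ne (c : Char) (w : List Char) (h : c ≠ '%') : pvCnt (c :: w) = pvCnt w := by
  cases w with
  | nil => simp [pvCnt]
  | cons d w2 => simp [pvCnt, h]

lemma replace_go_eq (l acc : List Char) (fuel : Nat) (hf : l.length ≤ fuel) :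
    PySem.Chars.replace.go ['%', '%'] [] fuel l acc = acc.reverse ++ pvRep l := by
  induction fuel generalizing l acc with
  | zero =>
    have hl : l = [] := List.length_eq_zero_iff.mp (Nat.le_zero.mp hf)
    subst hl
    simp [PySem.Chars.replace.go, pvRep]
  | succ n ih =>
    match l with
    | [] => simp [PySem.Chars.replace.go, pvRep]
    | [c1] =>
      have hp : List.isPrefixOf ['%', '%'] [c1] = false := by
        simp [List.isPrefixOf]
      rw [PySem.Chars.replace.go, hp]
      simp only [Bool.false_eq_true, if_false]
      rw [ih [] (c1 :: acc) (by simp)]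
      simp [pvRep]
    | c1 :: c2 :: t =>
      simp only [List.length_cons] at hf
      by_cases h12 : c1 = '%' ∧ c2 = '%'
      · have hp : List.isPrefixOf ['%', '%'] (c1 :: c2 :: t) = true := by
          simp [List.isPrefixOf, h12.1, h12.2]
        rw [PySem.Chars.replace.go, hp]
        simp only [if_true, List.reverse_nil, List.nil_append]
        rw [show List.drop (List.length ['%', '%']) (c1 :: c2 :: t) = t from rfl]
        rw [ih t acc (by omega)]
        simp [pvRep, h12]
      · have hp : List.isPrefixOf ['%', '%'] (c1 :: c2 :: t) = false := by
          rcases (not_and_or.mp h12) with h | h <;>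
            simp [List.isPrefixOf] <;> intro h1 h2 <;> exact h12 ⟨h1.symm, h2.symm⟩
        rw [PySem.Chars.replace.go, hp]
        simp only [Bool.false_eq_true, if_false]
        rw [ih (c2 :: t) (c1 :: acc) (by simp; omega)]
        simp [pvRep, h12]

lemma count_go_eq (l : List Char) (acc : Nat) (fuel : Nat) (hf : l.length ≤ fuel) :
    PySem.Chars.count.go ['%', 's'] fuel l acc = acc + pvCnt l := by
  induction fuel generalizing l acc with
  | zero =>
    have hl : l = [] := List.length_eq_zero_iff.mp (Nat.le_zero.mp hf)
    subst hl
    simp [PySem.Chars.count.go, pvCnt]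
  | succ n ih =>
    match l with
    | [] => simp [PySem.Chars.count.go, pvCnt]
    | [c1] =>
      have hp : List.isPrefixOf ['%', 's'] [c1] = false := by
        simp [List.isPrefixOf]
      rw [PySem.Chars.count.go, hp]
      simp only [Bool.false_eq_true, if_false]
      rw [ih [] acc (by simp)]
      simp [pvCnt]
    | c1 :: c2 :: t =>
      simp only [List.length_cons] at hf
      by_cases h12 : c1 = '%' ∧ c2 = 's'
      · have hp : List.isPrefixOf ['%', 's'] (c1 :: c2 :: t) = true := by
          simp [List.isPrefixOf, h12.1, h12.2]
        rw [PySem.Chars.count.go, hp]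
        simp only [if_true]
        rw [show List.drop (List.length ['%', 's']) (c1 :: c2 :: t) = t from rfl]
        rw [ih t (acc + 1) (by omega)]
        simp [pvCnt, h12]
        omega
      · have hp : List.isPrefixOf ['%', 's'] (c1 :: c2 :: t) = false := by
          rcases (not_and_or.mp h12) with h | h <;>
            simp [List.isPrefixOf] <;> intro h1 h2 <;> exact h12 ⟨h1.symm, h2.symm⟩
        rw [PySem.Chars.count.go, hp]
        simp only [Bool.false_eq_true, if_false]
        rw [ih (c2 :: t) acc (by simp; omega)]
        simp [pvCnt, h12]

-- A's loop computes the count of "%s" in the "%%"-stripped list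
lemma countAgo_eq (l : List Char) (acc : Int) : countAgo l acc = acc + (pvCnt (pvRep l) : Int) := by
  induction hn : l.length using Nat.strong_induction_on generalizing l acc with
  | _ n ih =>
    match l with
    | [] => simp [countAgo, pvRep, pvCnt]
    | [c] => simp [countAgo, pvRep, pvCnt]
    | c1 :: c2 :: t =>
      subst hn
      by_cases hA : c1 = '%' ∧ c2 = 's'
      · obtain ⟨h1, h2⟩ := hA; subst h1; subst h2
        rw [countAgo, if_pos ⟨rfl, rfl⟩]
        rw [ih t.length (by simp) t (acc + 1) rfl]
        rw [show pvRep ('%' :: 's' :: t) = '%' :: 's' :: pvRep t from by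
          rw [pvRep, if_neg (by simp), pvRep_cons_ne 's' t (by decide)]]
        rw [show pvCnt ('%' :: 's' :: pvRep t) = pvCnt (pvRep t) + 1 from by
          rw [pvCnt, if_pos ⟨rfl, rfl⟩]]
        push_cast; ring
      · by_cases hB : c1 = '%' ∧ c2 = '%'
        · rw [countAgo, if_neg hA, if_pos hB]
          rw [ih t.length (by simp) t acc rfl]
          obtain ⟨h1, h2⟩ := hB; subst h1; subst h2
          rw [show pvRep ('%' :: '%' :: t) = pvRep t from by rw [pvRep, if_pos ⟨rfl, rfl⟩]]
        · rw [countAgo, if_neg hA, if_neg hB]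
          rw [ih (c2 :: t).length (by simp) (c2 :: t) acc rfl]
          rw [show pvRep (c1 :: c2 :: t) = c1 :: pvRep (c2 :: t) from by rw [pvRep, if_neg hB]]
          by_cases hc1 : c1 = '%'
          · have hc2 : c2 ≠ '%' := fun h => hB ⟨hc1, h⟩
            have hc2s : c2 ≠ 's' := fun h => hA ⟨hc1, h⟩
            rw [pvRep_cons_ne c2 t hc2]
            subst hc1
            rw [show pvCnt ('%' :: c2 :: pvRep t) = pvCnt (c2 :: pvRep t) from by
              rw [pvCnt, if_neg (by rintro ⟨_, h⟩; exact hc2s h)]]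
          · rw [pvCnt_cons_ne c1 _ hc1]

lemma alt_eq (sql : String) : count_placeholders_py_alt sql = (pvCnt (pvRep sql.toList) : Int) := by
  unfold count_placeholders_py_alt
  rw [PySem.Str.count]
  rw [show (PySem.Str.replace sql "%%" "").toList
        = PySem.Chars.replace sql.toList "%%".toList "".toList from by
      simp [pysem]]
  rw [show ("%%".toList : List Char) = ['%', '%'] from by decide]
  rw [show ("%s".toList : List Char) = ['%', 's'] from by decide]
  rw [show ("".toList : List Char) = [] from by decide]
  rw [PySem.Chars.replace]
  simp only [List.isEmpty_cons, if_false, Bool.false_eq_true]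
  rw [replace_go_eq sql.toList [] sql.toList.length (le_refl _)]
  simp only [List.reverse_nil, List.nil_append]
  rw [PySem.Chars.count]
  simp only [List.isEmpty_cons, if_false, Bool.false_eq_true]
  rw [count_go_eq (pvRep sql.toList) 0 (pvRep sql.toList).length (le_refl _)]
  simp

-- ===== VERDICT (by name: the statement is the Claim_ definition above) =====
theorem count_placeholders_py_spec : Claim_equal_count_placeholders_py := by
  intro sql _
  unfold Spec_count_placeholders_py count_placeholders_py
  rw [countAgo_eq, alt_eq]
  simp
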